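-- pv_equiv track=rewrite | github.com/danib549/ui-db | metadata_parser.py | build_table_name_map
-- ===== SOURCE A (Python) =====
-- def build_table_name_map(
--     loaded_table_names: list[str],
--     metadata_table_names: set[str],
-- ) -> dict[str, str]:
--     """Build a mapping from metadata table names to loaded table names.
--
--     The SQL export names data CSVs as '{schema}_{table}.csv' (e.g. 'dbo_Users.csv'),
--     but metadata references just '{table}' (e.g. 'Users').
--
--     Returns: dict mapping metadata_name -> loaded_name.
--     """
--     name_map: dict[str, str] = {}
--
--     for meta_name in metadata_table_names:
--         meta_lower = meta_name.lower()
--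
--         # Direct match first
--         for loaded in loaded_table_names:
--             if loaded.lower() == meta_lower:
--                 name_map[meta_name] = loaded
--                 break
--         else:
--             # Try suffix match: 'dbo_Users' ends with '_Users'
--             for loaded in loaded_table_names:
--                 loaded_lower = loaded.lower()
--                 if loaded_lower.endswith("_" + meta_lower):
--                     name_map[meta_name] = loaded
--                     break
--
--     return name_map
-- ===== SOURCE B (Python) =====
-- def build_table_name_map(
--     loaded_table_names: list[str],
--     metadata_table_names: set[str],
-- ) -> dict[str, str]:
--     """Build a mapping from metadata table names to loaded table names.
--
--     One pass over loaded_table_names precomputes two dicts (first match wins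
--     via setdefault): lowered name -> loaded name, and every suffix after an
--     underscore of the lowered name -> loaded name.  Each metadata name is
--     then resolved with two O(1) lookups.
--     """
--     direct: dict[str, str] = {}
--     suffix: dict[str, str] = {}
--     for loaded in loaded_table_names:
--         ll = loaded.lower()
--         direct.setdefault(ll, loaded)
--         for i, ch in enumerate(ll):
--             if ch == "_":
--                 suffix.setdefault(ll[i + 1:], loaded)
--
--     name_map: dict[str, str] = {}
--     for meta_name in metadata_table_names:
--         ml = meta_name.lower()
--         if ml in direct:
--             name_map[meta_name] = direct[ml]
--         elif ml in suffix:
--             name_map[meta_name] = suffix[ml]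
--     return name_map
-- ===== Notes on version B (the rewrite author's own statement) =====
-- stated objective: faster
-- what changed: Replaces the per-metadata-name linear scans over loaded_table_names with two dicts built in one pass (direct lowered-name matches and every after-underscore suffix, setdefault so the first loaded name wins), so each metadata name is resolved by two O(1) lookups.
import Mathlib
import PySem

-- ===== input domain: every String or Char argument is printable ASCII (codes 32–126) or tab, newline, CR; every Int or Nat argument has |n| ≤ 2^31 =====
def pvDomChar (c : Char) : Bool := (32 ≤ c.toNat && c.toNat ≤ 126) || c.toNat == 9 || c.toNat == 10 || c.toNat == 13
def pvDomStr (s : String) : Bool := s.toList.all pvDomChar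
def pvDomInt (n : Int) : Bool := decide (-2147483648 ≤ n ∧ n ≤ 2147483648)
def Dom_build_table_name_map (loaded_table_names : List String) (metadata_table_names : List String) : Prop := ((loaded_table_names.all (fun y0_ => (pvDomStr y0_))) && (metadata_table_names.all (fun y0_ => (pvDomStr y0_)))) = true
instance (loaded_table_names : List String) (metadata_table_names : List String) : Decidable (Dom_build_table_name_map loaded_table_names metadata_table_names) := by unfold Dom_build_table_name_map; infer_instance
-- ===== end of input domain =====

-- B precomputes a direct-match dict and an after-underscore-suffix dict in one pass over
-- loaded_table_names, replacing A's per-metadata-name linear scans with two lookups.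
-- ===== PORT A =====
-- inner 'for loaded in loaded_table_names: if loaded.lower() == meta_lower: … break'
def aDirectScan (loaded : List String) (ml : List Char) : Option String :=
  match loaded with
  | [] => none
  | l :: rest =>
    if PySem.Chars.lower l.toList = ml then some l else aDirectScan rest ml

-- inner 'for loaded in loaded_table_names: if loaded.lower().endswith("_" + meta_lower): … break'
def aSuffixScan (loaded : List String) (ml : List Char) : Option String :=
  match loaded with
  | [] => none
  | l :: rest =>
    if PySem.Chars.endswith (PySem.Chars.lower l.toList) ('_' :: ml) then some l
    else aSuffixScan rest ml

def build_table_name_map (loaded_table_names : List String) (metadata_table_names : List String) : List (String × String) :=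
  (metadata_table_names.foldl (fun (d : PySem.Dict String String) m =>
      let ml := PySem.Chars.lower m.toList
      match aDirectScan loaded_table_names ml with
      | some l => d.insert m l
      | none =>
        match aSuffixScan loaded_table_names ml with
        | some l => d.insert m l
        | none => d)
    PySem.Dict.empty).items

-- ===== PORT B =====
-- 'for i, ch in enumerate(ll): if ch == "_": … ll[i+1:]' — each cons step keeps the tail = ll[i+1:]
def bSuffixesAfterUnderscore (ll : List Char) : List (List Char) :=
  match ll with
  | [] => []
  | c :: rest =>
    if c = '_' then rest :: bSuffixesAfterUnderscore rest
    else bSuffixesAfterUnderscore rest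

def build_table_name_map_alt (loaded_table_names : List String) (metadata_table_names : List String) : List (String × String) :=
  let direct := loaded_table_names.foldl
    (fun (d : PySem.Dict (List Char) String) l => d.setdefault (PySem.Chars.lower l.toList) l)
    PySem.Dict.empty
  let suffix := loaded_table_names.foldl
    (fun (d : PySem.Dict (List Char) String) l =>
      (bSuffixesAfterUnderscore (PySem.Chars.lower l.toList)).foldl
        (fun d k => d.setdefault k l) d)
    PySem.Dict.empty
  (metadata_table_names.foldl (fun (d : PySem.Dict String String) m =>
      let ml := PySem.Chars.lower m.toList
      match direct.get? ml with
      | some l => d.insert m l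
      | none =>
        match suffix.get? ml with
        | some l => d.insert m l
        | none => d)
    PySem.Dict.empty).items

-- ===== PRECONDITION & SPEC =====
def Spec_build_table_name_map (loaded_table_names : List String) (metadata_table_names : List String) (out : List (String × String)) : Prop := out = build_table_name_map_alt loaded_table_names metadata_table_names
instance (loaded_table_names : List String) (metadata_table_names : List String) (out : List (String × String)) : Decidable (Spec_build_table_name_map loaded_table_names metadata_table_names out) := by unfold Spec_build_table_name_map; infer_instance

-- ===== CLAIM (what is proved, stated in full; the proofs are below) =====
def Claim_equal_build_table_name_map : Prop := ∀ (loaded_table_names : List String) (metadata_table_names : List String), Dom_build_table_name_map loaded_table_names metadata_table_names → Spec_build_table_name_map loaded_table_names metadata_table_names (build_table_name_map loaded_table_names metadata_table_names)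

-- ===== LEMMAS AND PROOFS =====

-- ===== VERDICT (by name: the statement is the Claim_ definition above) =====
lemma directDict_get (loaded : List String) (d : PySem.Dict (List Char) String) (ml : List Char) :
    (loaded.foldl (fun d l => d.setdefault (PySem.Chars.lower l.toList) l) d).get? ml
      = (d.get? ml).or (aDirectScan loaded ml) := by
  induction loaded generalizing d with
  | nil => simp [aDirectScan]
  | cons l rest ih =>
    simp only [List.foldl_cons, ih, aDirectScan]
    by_cases h : PySem.Chars.lower l.toList = ml
    · subst h
      rw [PySem.Dict.get?_setdefault_self]
      rcases d.get? (PySem.Chars.lower l.toList) with _ | v <;> simp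
    · rw [PySem.Dict.get?_setdefault_of_ne _ _ (fun he => h he.symm)]
      simp [h]

lemma suffixInner_get (keys : List (List Char)) (l : String)
    (d : PySem.Dict (List Char) String) (ml : List Char) :
    (keys.foldl (fun d k => d.setdefault k l) d).get? ml
      = if ml ∈ keys then (d.get? ml).or (some l) else d.get? ml := by
  induction keys generalizing d with
  | nil => simp
  | cons k rest ih =>
    simp only [List.foldl_cons, ih, List.mem_cons]
    by_cases h : k = ml
    · subst h
      rw [PySem.Dict.get?_setdefault_self]
      rcases d.get? k with _ | v <;> simp
    · rw [PySem.Dict.get?_setdefault_of_ne _ _ (fun he => h he.symm)]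
      have h' : ¬ (ml = k) := fun he => h he.symm
      simp [h']

lemma mem_bSuffixes_iff (ll ml : List Char) :
    ml ∈ bSuffixesAfterUnderscore ll ↔ ('_' :: ml) <:+ ll := by
  induction ll with
  | nil => simp [bSuffixesAfterUnderscore]
  | cons c rest ih =>
    simp only [bSuffixesAfterUnderscore, List.suffix_cons_iff]
    by_cases h : c = '_'
    · subst h
      rw [if_pos rfl]
      simp only [List.mem_cons, ih, List.cons.injEq, true_and]
    · rw [if_neg h]
      simp only [ih, List.cons.injEq]
      constructor
      · exact Or.inr
      · rintro (⟨he, _⟩ | hs)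
        · exact absurd he.symm h
        · exact hs

lemma suffixDict_get (loaded : List String) (d : PySem.Dict (List Char) String) (ml : List Char) :
    (loaded.foldl (fun d l =>
        (bSuffixesAfterUnderscore (PySem.Chars.lower l.toList)).foldl
          (fun d k => d.setdefault k l) d) d).get? ml
      = (d.get? ml).or (aSuffixScan loaded ml) := by
  induction loaded generalizing d with
  | nil => simp [aSuffixScan]
  | cons l rest ih =>
    simp only [List.foldl_cons, ih, aSuffixScan, suffixInner_get, mem_bSuffixes_iff]
    by_cases h : ('_' :: ml) <:+ PySem.Chars.lower l.toList
    · rw [if_pos h, if_pos ((PySem.Chars.endswith_iff _ _).2 h)]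
      rcases d.get? ml with _ | v <;> simp
    · rw [if_neg h, if_neg (fun hc => h ((PySem.Chars.endswith_iff _ _).1 hc))]

theorem build_table_name_map_spec : Claim_equal_build_table_name_map := by
  intro loaded md _
  unfold Spec_build_table_name_map build_table_name_map build_table_name_map_alt
  congr 1
  apply PySem.List.foldl_congr_mem
  intro d m _
  simp only [directDict_get, suffixDict_get, PySem.Dict.get?_empty, Option.none_or]
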